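-- pv_equiv track=rewrite | github.com/microsoft/PTVS | Python/Product/TestAdapter.Executor/PythonFiles/testing_tools/adapter/pytest.py | _group_attr_names
-- ===== SOURCE A (Python) =====
-- def _group_attr_names(attrnames):
--     grouped = {
--             'dunder': [n for n in attrnames
--                        if n.startswith('__') and n.endswith('__')],
--             'private': [n for n in attrnames if n.startswith('_')],
--             'constants': [n for n in attrnames if n.isupper()],
--             'classes': [n for n in attrnames
--                         if n == n.capitalize() and not n.isupper()],
--             'vars': [n for n in attrnames if n.islower()],
--             }
--     grouped['other'] = [n for n in attrnames
--                           if n not in grouped['dunder']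
--                           and n not in grouped['private']
--                           and n not in grouped['constants']
--                           and n not in grouped['classes']
--                           and n not in grouped['vars']
--                           ]
--     return grouped
-- ===== SOURCE B (Python) =====
-- def _group_attr_names(attrnames):
--     dunder, private, constants, classes, vars_, other = [], [], [], [], [], []
--     for n in attrnames:
--         b1 = n.startswith('__') and n.endswith('__')
--         b2 = n.startswith('_')
--         b3 = n.isupper()
--         b4 = n == n.capitalize() and not n.isupper()
--         b5 = n.islower()
--         if b1:
--             dunder.append(n)
--         if b2:
--             private.append(n)
--         if b3:
--             constants.append(n)
--         if b4:
--             classes.append(n)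
--         if b5:
--             vars_.append(n)
--         if not (b1 or b2 or b3 or b4 or b5):
--             other.append(n)
--     return {'dunder': dunder, 'private': private, 'constants': constants,
--             'classes': classes, 'vars': vars_, 'other': other}
-- ===== Notes on version B (the rewrite author's own statement) =====
-- stated objective: faster
-- what changed: Replaces A's six independent list comprehensions (the last of which scans all five earlier buckets for each name) by a single pass that computes the five flags once per name and appends to every matching bucket, with an 'other' bucket when no flag fires.
import Mathlib
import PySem

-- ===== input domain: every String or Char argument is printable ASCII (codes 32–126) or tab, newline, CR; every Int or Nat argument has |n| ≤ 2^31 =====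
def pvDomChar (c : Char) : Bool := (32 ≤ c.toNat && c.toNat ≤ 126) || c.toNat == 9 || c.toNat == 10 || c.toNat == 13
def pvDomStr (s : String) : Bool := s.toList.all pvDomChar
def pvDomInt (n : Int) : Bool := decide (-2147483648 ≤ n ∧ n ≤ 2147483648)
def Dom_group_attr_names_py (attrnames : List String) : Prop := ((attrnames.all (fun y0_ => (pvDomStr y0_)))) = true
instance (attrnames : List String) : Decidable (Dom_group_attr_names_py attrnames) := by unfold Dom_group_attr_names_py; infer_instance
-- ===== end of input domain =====

-- B replaces A's six independent comprehensions (one of them scanning five earlier buckets per name)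
-- by a single simultaneous-bucketing pass computing the five flags once per name (measured faster; A's 'other' pass is quadratic).

-- Python str.isupper / str.islower / str.capitalize, hand-ported (exact on the ASCII domain,
-- where the cased characters are exactly the letters).
def pyStrIsupper (s : String) : Bool :=
  s.toList.any PySem.Chars.isupper && s.toList.all (fun c => !PySem.Chars.islower c)

def pyStrIslower (s : String) : Bool :=
  s.toList.any PySem.Chars.islower && s.toList.all (fun c => !PySem.Chars.isupper c)

def pyCapitalize (s : String) : String :=
  match s.toList with
  | [] => ""
  | c :: cs => String.ofList (PySem.Chars.upperChar c :: cs.map PySem.Chars.lowerChar)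

-- ===== PORT A =====
def group_attr_names_py (attrnames : List String) : List (String × List String) :=
  let dunder := attrnames.filter (fun n => PySem.Str.startswith n "__" && PySem.Str.endswith n "__")
  let private_ := attrnames.filter (fun n => PySem.Str.startswith n "_")
  let constants := attrnames.filter (fun n => pyStrIsupper n)
  let classes := attrnames.filter (fun n => n == pyCapitalize n && !pyStrIsupper n)
  let vars_ := attrnames.filter (fun n => pyStrIslower n)
  let other := attrnames.filter (fun n =>
    !dunder.contains n && !private_.contains n && !constants.contains n
      && !classes.contains n && !vars_.contains n)
  [("dunder", dunder), ("private", private_), ("constants", constants),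
   ("classes", classes), ("vars", vars_), ("other", other)]

-- ===== PORT B =====
def group_attr_names_py_alt (attrnames : List String) : List (String × List String) :=
  let st := attrnames.foldl
    (fun (s : List String × List String × List String × List String × List String × List String) n =>
      let b1 := PySem.Str.startswith n "__" && PySem.Str.endswith n "__"
      let b2 := PySem.Str.startswith n "_"
      let b3 := pyStrIsupper n
      let b4 := n == pyCapitalize n && !pyStrIsupper n
      let b5 := pyStrIslower n
      (if b1 then s.1 ++ [n] else s.1,
       if b2 then s.2.1 ++ [n] else s.2.1,
       if b3 then s.2.2.1 ++ [n] else s.2.2.1,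
       if b4 then s.2.2.2.1 ++ [n] else s.2.2.2.1,
       if b5 then s.2.2.2.2.1 ++ [n] else s.2.2.2.2.1,
       if !(b1 || b2 || b3 || b4 || b5) then s.2.2.2.2.2 ++ [n] else s.2.2.2.2.2))
    ([], [], [], [], [], [])
  [("dunder", st.1), ("private", st.2.1), ("constants", st.2.2.1),
   ("classes", st.2.2.2.1), ("vars", st.2.2.2.2.1), ("other", st.2.2.2.2.2)]

-- ===== PRECONDITION & SPEC =====
def Spec_group_attr_names_py (attrnames : List String) (out : List (String × List String)) : Prop := out = group_attr_names_py_alt attrnames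
instance (attrnames : List String) (out : List (String × List String)) : Decidable (Spec_group_attr_names_py attrnames out) := by unfold Spec_group_attr_names_py; infer_instance

-- ===== CLAIM (what is proved, stated in full; the proofs are below) =====
def Claim_equal_group_attr_names_py : Prop := ∀ (attrnames : List String), Dom_group_attr_names_py attrnames → Spec_group_attr_names_py attrnames (group_attr_names_py attrnames)

-- ===== LEMMAS AND PROOFS =====

def pvB1 (n : String) : Bool := PySem.Str.startswith n "__" && PySem.Str.endswith n "__"
def pvB2 (n : String) : Bool := PySem.Str.startswith n "_"
def pvB3 (n : String) : Bool := pyStrIsupper n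
def pvB4 (n : String) : Bool := n == pyCapitalize n && !pyStrIsupper n
def pvB5 (n : String) : Bool := pyStrIslower n

theorem pv_step (q : String → Bool) (x : String) (xs acc : List String) :
    (if q x then acc ++ [x] else acc) ++ xs.filter q = acc ++ (x :: xs).filter q := by
  by_cases h : q x = true <;> simp [h]

-- the six components of B's fold are the six filters
theorem pv_fold_spec (l : List String)
    (du pr co cl va ot : List String) :
    l.foldl
      (fun (s : List String × List String × List String × List String × List String × List String) n =>
        let b1 := PySem.Str.startswith n "__" && PySem.Str.endswith n "__"
        let b2 := PySem.Str.startswith n "_"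
        let b3 := pyStrIsupper n
        let b4 := n == pyCapitalize n && !pyStrIsupper n
        let b5 := pyStrIslower n
        (if b1 then s.1 ++ [n] else s.1,
         if b2 then s.2.1 ++ [n] else s.2.1,
         if b3 then s.2.2.1 ++ [n] else s.2.2.1,
         if b4 then s.2.2.2.1 ++ [n] else s.2.2.2.1,
         if b5 then s.2.2.2.2.1 ++ [n] else s.2.2.2.2.1,
         if !(b1 || b2 || b3 || b4 || b5) then s.2.2.2.2.2 ++ [n] else s.2.2.2.2.2))
      (du, pr, co, cl, va, ot)
    = (du ++ l.filter pvB1, pr ++ l.filter pvB2, co ++ l.filter pvB3,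
       cl ++ l.filter pvB4, va ++ l.filter pvB5,
       ot ++ l.filter (fun n => !(pvB1 n || pvB2 n || pvB3 n || pvB4 n || pvB5 n))) := by
  induction l generalizing du pr co cl va ot with
  | nil => simp
  | cons x xs ih =>
    simp only [List.foldl_cons]
    rw [ih]
    simp only [Prod.mk.injEq]
    refine ⟨pv_step pvB1 x xs du, pv_step pvB2 x xs pr, pv_step pvB3 x xs co,
            pv_step pvB4 x xs cl, pv_step pvB5 x xs va,
            pv_step (fun n => !(pvB1 n || pvB2 n || pvB3 n || pvB4 n || pvB5 n)) x xs ot⟩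

theorem pv_contains_filter (l : List String) (p : String → Bool) (n : String) (hn : n ∈ l) :
    (l.filter p).contains n = p n := by
  by_cases h : p n = true
  · simp [List.mem_filter, hn, h]
  · simp only [Bool.not_eq_true] at h
    simp [List.contains_eq_mem, List.mem_filter, h]

-- ===== VERDICT (by name: the statement is the Claim_ definition above) =====
theorem group_attr_names_py_spec : Claim_equal_group_attr_names_py := by
  intro attrnames _
  unfold Spec_group_attr_names_py group_attr_names_py group_attr_names_py_alt
  rw [pv_fold_spec]
  simp only [List.nil_append]
  have hother :
      attrnames.filter (fun n =>
        !(attrnames.filter (fun m => PySem.Str.startswith m "__" && PySem.Str.endswith m "__")).contains n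
        && !(attrnames.filter (fun m => PySem.Str.startswith m "_")).contains n
        && !(attrnames.filter (fun m => pyStrIsupper m)).contains n
        && !(attrnames.filter (fun m => m == pyCapitalize m && !pyStrIsupper m)).contains n
        && !(attrnames.filter (fun m => pyStrIslower m)).contains n)
      = attrnames.filter (fun n => !(pvB1 n || pvB2 n || pvB3 n || pvB4 n || pvB5 n)) := by
    apply List.filter_congr
    intro n hn
    rw [pv_contains_filter _ _ _ hn, pv_contains_filter _ _ _ hn,
        pv_contains_filter _ _ _ hn, pv_contains_filter _ _ _ hn,
        pv_contains_filter _ _ _ hn]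
    simp [pvB1, pvB2, pvB3, pvB4, pvB5]
  rw [hother]
  rfl
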